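-- pv_equiv track=rewrite | github.com/yves-chevallier/pyxindy | src/xindy/tex/tex2xindy.py | _split_levels
-- ===== SOURCE A (Python) =====
-- def _split_levels(term: str) -> tuple[tuple[str, ...], tuple[str, ...] | None]:
--     """Split ``term`` into hierarchy levels and display overrides."""
--     parts: list[str] = []
--     depth = 0
--     escape = False
--     buf: list[str] = []
--     for ch in term:
--         if escape:
--             buf.append(ch)
--             escape = False
--             continue
--         if ch == "\\":
--             escape = True
--             buf.append(ch)
--             continue
--         if ch == "{":
--             depth += 1
--             buf.append(ch)
--             continue
--         if ch == "}":
--             depth = max(0, depth - 1)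
--             buf.append(ch)
--             continue
--         if ch == "!" and depth == 0:
--             parts.append("".join(buf))
--             buf = []
--             continue
--         buf.append(ch)
--     if buf:
--         parts.append("".join(buf))
--
--     key_parts: list[str] = []
--     display_parts: list[str] = []
--     display_differs = False
--
--     for part in parts:
--         sort_text, display_text = _split_actual(part)
--         sort_norm = _normalize_token(sort_text)
--         display_norm = _normalize_token(display_text)
--         key_parts.append(sort_norm)
--         display_parts.append(display_norm)
--         if sort_norm != display_norm:
--             display_differs = True
--
--     display_tuple = tuple(display_parts) if display_differs else None
--     return tuple(key_parts), display_tuple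
--
-- def _split_actual(part: str) -> tuple[str, str]:
--     """Split one level into (sort, display) on the first unescaped '@'."""
--     depth = 0
--     escape = False
--     for idx, ch in enumerate(part):
--         if escape:
--             escape = False
--             continue
--         if ch == "\\":
--             escape = True
--             continue
--         if ch == "{":
--             depth += 1
--             continue
--         if ch == "}":
--             depth = max(0, depth - 1)
--             continue
--         if ch == "@" and depth == 0:
--             return part[:idx], part[idx + 1 :]
--     return part, part
--
-- def _normalize_token(text: str) -> str:
--     """Trim whitespace and unescape a handful of TeX separators."""
--     if text is None:
--         return ""
--     text = text.strip()
--     if text.startswith("\\relax"):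
--         text = text[len("\\relax") :].strip()
--     # unescape makeindex separators
--     text = (
--         text.replace("\\!", "!")
--         .replace("\\@", "@")
--         .replace("\\|", "|")
--         .replace("\\{", "{")
--         .replace("\\}", "}")
--     )
--     text = text.replace("\\\\", "\\")
--     return text
-- ===== SOURCE B (Python) =====
-- def _split_levels(term: str) -> tuple[tuple[str, ...], tuple[str, ...] | None]:
--     """Single fused scan: levels and the '@' display split are found in one pass."""
--     key_parts: list[str] = []
--     display_parts: list[str] = []
--     display_differs = False
--     sort_buf: list[str] = []
--     disp_buf: list[str] | None = None
--     depth = 0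
--     escape = False
--
--     def _finalize() -> None:
--         nonlocal display_differs
--         sort_norm = _normalize_token("".join(sort_buf))
--         if disp_buf is None:
--             display_norm = sort_norm
--         else:
--             display_norm = _normalize_token("".join(disp_buf))
--         key_parts.append(sort_norm)
--         display_parts.append(display_norm)
--         if sort_norm != display_norm:
--             display_differs = True
--
--     for ch in term:
--         cur = sort_buf if disp_buf is None else disp_buf
--         if escape:
--             cur.append(ch)
--             escape = False
--         elif ch == "\\":
--             escape = True
--             cur.append(ch)
--         elif ch == "{":
--             depth += 1
--             cur.append(ch)
--         elif ch == "}":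
--             depth = max(0, depth - 1)
--             cur.append(ch)
--         elif ch == "!" and depth == 0:
--             _finalize()
--             sort_buf = []
--             disp_buf = None
--         elif ch == "@" and depth == 0 and disp_buf is None:
--             disp_buf = []
--         else:
--             cur.append(ch)
--     if sort_buf or disp_buf is not None:
--         _finalize()
--     return tuple(key_parts), tuple(display_parts) if display_differs else None
--
--
-- def _normalize_token(text: str) -> str:
--     """Trim whitespace and unescape a handful of TeX separators."""
--     if text is None:
--         return ""
--     text = text.strip()
--     if text.startswith("\\relax"):
--         text = text[len("\\relax") :].strip()
--     text = (
--         text.replace("\\!", "!")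
--         .replace("\\@", "@")
--         .replace("\\|", "|")
--         .replace("\\{", "{")
--         .replace("\\}", "}")
--     )
--     text = text.replace("\\\\", "\\")
--     return text
-- ===== Notes on version B (the rewrite author's own statement) =====
-- stated objective: simpler
-- what changed: B fuses A's two phases into one left-to-right scan: instead of first collecting raw level strings and then re-scanning each level with _split_actual to find its display marker (at-sign), B maintains the current level's sort and display buffers directly during the single pass and finalizes a level whenever an unescaped depth-0 level separator (exclamation mark) or the end of input is reached, so the intermediate parts list and the second per-level scan disappear.
import Mathlib
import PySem

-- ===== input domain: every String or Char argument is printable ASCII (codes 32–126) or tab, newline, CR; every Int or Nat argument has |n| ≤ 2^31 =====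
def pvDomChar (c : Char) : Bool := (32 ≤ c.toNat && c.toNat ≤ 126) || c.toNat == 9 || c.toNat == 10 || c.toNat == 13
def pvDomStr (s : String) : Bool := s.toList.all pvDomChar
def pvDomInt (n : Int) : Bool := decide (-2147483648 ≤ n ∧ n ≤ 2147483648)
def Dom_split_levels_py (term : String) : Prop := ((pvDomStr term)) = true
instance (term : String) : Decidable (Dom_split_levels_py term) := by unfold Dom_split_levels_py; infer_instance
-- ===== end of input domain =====

-- B fuses A's two passes (level split, then per-level '@' split) into one scan; objective: simpler.

-- ===== PORT A =====
-- _normalize_token (shared verbatim by A and B in Python, so one shared helper here)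
def pvNormalize (t : List Char) : List Char :=
  let t := PySem.Chars.strip t
  let t := if PySem.Chars.startswith t "\\relax".toList then PySem.Chars.strip (t.drop 6) else t
  let t := PySem.Chars.replace t "\\!".toList "!".toList
  let t := PySem.Chars.replace t "\\@".toList "@".toList
  let t := PySem.Chars.replace t "\\|".toList "|".toList
  let t := PySem.Chars.replace t "\\{".toList "{".toList
  let t := PySem.Chars.replace t "\\}".toList "}".toList
  PySem.Chars.replace t "\\\\".toList "\\".toList

-- one iteration of A's first loop; state = (parts, depth, escape, buf)
def pvStepA : List (List Char) × Int × Bool × List Char → Char → List (List Char) × Int × Bool × List Char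
  | (parts, depth, _escape, buf), c =>
    if _escape then (parts, depth, false, buf ++ [c])
    else if c = '\\' then (parts, depth, true, buf ++ [c])
    else if c = '{' then (parts, depth + 1, false, buf ++ [c])
    else if c = '}' then (parts, max 0 (depth - 1), false, buf ++ [c])
    else if c = '!' ∧ depth = 0 then (parts ++ [buf], depth, false, [])
    else (parts, depth, false, buf ++ [c])

-- _split_actual: the `for idx, ch in enumerate(part)` loop
def pvSplitActualAux (part : List Char) (idx : Nat) (rest : List Char) (depth : Int) (escape : Bool) :
    List Char × List Char :=
  match rest with
  | [] => (part, part)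
  | c :: rs =>
    if escape then pvSplitActualAux part (idx + 1) rs depth false
    else if c = '\\' then pvSplitActualAux part (idx + 1) rs depth true
    else if c = '{' then pvSplitActualAux part (idx + 1) rs (depth + 1) escape
    else if c = '}' then pvSplitActualAux part (idx + 1) rs (max 0 (depth - 1)) escape
    else if c = '@' ∧ depth = 0 then (part.take idx, part.drop (idx + 1))
    else pvSplitActualAux part (idx + 1) rs depth escape

def pvSplitActual (part : List Char) : List Char × List Char :=
  pvSplitActualAux part 0 part 0 false

-- one iteration of A's second loop; state = (key_parts, display_parts, display_differs)
def pvStepPart : List (List Char) × List (List Char) × Bool → List Char →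
    List (List Char) × List (List Char) × Bool
  | (keys, disps, differs), part =>
    let sd := pvSplitActual part
    let sn := pvNormalize sd.1
    let dn := pvNormalize sd.2
    (keys ++ [sn], disps ++ [dn], differs || decide (sn ≠ dn))

def split_levels_py (term : String) : List String × Option (List String) :=
  let st := term.toList.foldl pvStepA ([], 0, false, [])
  let parts := if st.2.2.2 ≠ [] then st.1 ++ [st.2.2.2] else st.1
  let r := parts.foldl pvStepPart ([], [], false)
  (r.1.map String.mk, if r.2.2 then some (r.2.1.map String.mk) else none)

-- ===== PORT B =====
-- append ch to the current buffer (disp_buf if it exists, else sort_buf)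
def pvApp (s : List Char) (o : Option (List Char)) (c : Char) : List Char × Option (List Char) :=
  match o with
  | none => (s ++ [c], none)
  | some l => (s, some (l ++ [c]))

-- _finalize: close the current level
def pvFinalize (keys disps : List (List Char)) (f : Bool) (s : List Char) (o : Option (List Char)) :
    List (List Char) × List (List Char) × Bool :=
  let sn := pvNormalize s
  let dn := match o with | none => sn | some l => pvNormalize l
  (keys ++ [sn], disps ++ [dn], f || decide (sn ≠ dn))

-- one iteration of B's single fused loop; state = (key_parts, display_parts, differs, sort_buf, disp_buf, depth, escape)
def pvStepB : List (List Char) × List (List Char) × Bool × List Char × Option (List Char) × Int × Bool →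
    Char → List (List Char) × List (List Char) × Bool × List Char × Option (List Char) × Int × Bool
  | (keys, disps, f, s, o, d, e), c =>
    if e then (keys, disps, f, (pvApp s o c).1, (pvApp s o c).2, d, false)
    else if c = '\\' then (keys, disps, f, (pvApp s o c).1, (pvApp s o c).2, d, true)
    else if c = '{' then (keys, disps, f, (pvApp s o c).1, (pvApp s o c).2, d + 1, e)
    else if c = '}' then (keys, disps, f, (pvApp s o c).1, (pvApp s o c).2, max 0 (d - 1), e)
    else if c = '!' ∧ d = 0 then ((pvFinalize keys disps f s o).1, (pvFinalize keys disps f s o).2.1, (pvFinalize keys disps f s o).2.2, [], none, d, e)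
    else if c = '@' ∧ d = 0 ∧ o = none then (keys, disps, f, s, some [], d, e)
    else (keys, disps, f, (pvApp s o c).1, (pvApp s o c).2, d, e)

def split_levels_py_alt (term : String) : List String × Option (List String) :=
  let st := term.toList.foldl pvStepB ([], [], false, [], none, 0, false)
  let r := if st.2.2.2.1 ≠ [] ∨ st.2.2.2.2.1 ≠ none then
      pvFinalize st.1 st.2.1 st.2.2.1 st.2.2.2.1 st.2.2.2.2.1
    else (st.1, st.2.1, st.2.2.1)
  (r.1.map String.mk, if r.2.2 then some (r.2.1.map String.mk) else none)

-- ===== PRECONDITION & SPEC =====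
def Spec_split_levels_py (term : String) (out : List String × Option (List String)) : Prop := out = split_levels_py_alt term
instance (term : String) (out : List String × Option (List String)) : Decidable (Spec_split_levels_py term out) := by unfold Spec_split_levels_py; infer_instance

-- ===== CLAIM (what is proved, stated in full; the proofs are below) =====
def Claim_equal_split_levels_py : Prop := ∀ (term : String), Dom_split_levels_py term → Spec_split_levels_py term (split_levels_py term)

-- ===== LEMMAS AND PROOFS =====

-- the per-level scan state transition (sort_buf, disp_buf, depth, escape), proofs only
def pvScanStep : List Char × Option (List Char) × Int × Bool → Char →
    List Char × Option (List Char) × Int × Bool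
  | (s, o, d, e), c =>
    if e then ((pvApp s o c).1, (pvApp s o c).2, d, false)
    else if c = '\\' then ((pvApp s o c).1, (pvApp s o c).2, d, true)
    else if c = '{' then ((pvApp s o c).1, (pvApp s o c).2, d + 1, e)
    else if c = '}' then ((pvApp s o c).1, (pvApp s o c).2, max 0 (d - 1), e)
    else if c = '@' ∧ d = 0 ∧ o = none then (s, some [], d, e)
    else ((pvApp s o c).1, (pvApp s o c).2, d, e)

def pvEnc : Option (List Char) → List Char
  | none => []
  | some l => '@' :: l

theorem pvApp_enc (s : List Char) (o : Option (List Char)) (c : Char) :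
    (pvApp s o c).1 ++ pvEnc (pvApp s o c).2 = (s ++ pvEnc o) ++ [c] := by
  cases o <;> simp [pvApp, pvEnc]

-- A's first loop only appends to the parts accumulator
theorem pvFoldA_absorb (cs : List Char) (P : List (List Char)) (d : Int) (e : Bool) (buf : List Char) :
    cs.foldl pvStepA (P, d, e, buf) =
      (P ++ (cs.foldl pvStepA ([], d, e, buf)).1,
       (cs.foldl pvStepA ([], d, e, buf)).2) := by
  induction cs generalizing P d e buf with
  | nil => simp
  | cons c cs ih =>
    simp only [List.foldl_cons, pvStepA]
    split_ifs
    · exact ih _ _ _ _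
    · exact ih _ _ _ _
    · exact ih _ _ _ _
    · exact ih _ _ _ _
    · rw [ih (P ++ [buf]), ih ([] ++ [buf])]; simp
    · exact ih _ _ _ _

-- after the '@' split, every remaining character goes to disp_buf
theorem pvScan_after_split (rest : List Char) (s l : List Char) (d : Int) (e : Bool) :
    (rest.foldl pvScanStep (s, some l, d, e)).1 = s ∧
    (rest.foldl pvScanStep (s, some l, d, e)).2.1 = some (l ++ rest) := by
  induction rest generalizing l d e with
  | nil => simp
  | cons c cs ih =>
    simp only [List.foldl_cons, pvScanStep, pvApp]
    split_ifs with h1 h2 h3 h4 h5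
    · simpa using ih (l ++ [c]) d false
    · simpa using ih (l ++ [c]) d true
    · simpa using ih (l ++ [c]) (d + 1) e
    · simpa using ih (l ++ [c]) (max 0 (d - 1)) e
    · simp at h5
    · simpa using ih (l ++ [c]) d e

-- _split_actual computed by the fused scan
theorem pvSplitActualAux_scan (rest pre : List Char) (d : Int) (e : Bool) :
    pvSplitActualAux (pre ++ rest) pre.length rest d e =
      (match (rest.foldl pvScanStep (pre, none, d, e)).2.1 with
       | some l => ((rest.foldl pvScanStep (pre, none, d, e)).1, l)
       | none => (pre ++ rest, pre ++ rest)) := by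
  induction rest generalizing pre d e with
  | nil => simp [pvSplitActualAux]
  | cons c cs ih =>
    simp only [List.foldl_cons, pvScanStep, pvSplitActualAux]
    by_cases he : e
    · have h := ih (pre ++ [c]) d false
      simp [he, pvApp] at h ⊢
      simpa using h
    · by_cases h1 : c = '\\'
      · have h := ih (pre ++ [c]) d true
        simp [he, h1, pvApp] at h ⊢
        simpa using h
      · by_cases h2 : c = '{'
        · have h := ih (pre ++ [c]) (d + 1) e
          simp [he, h2, pvApp] at h ⊢
          simpa [he] using h
        · by_cases h3 : c = '}'
          · have h := ih (pre ++ [c]) (max 0 (d - 1)) e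
            simp [he, h3, pvApp] at h ⊢
            simpa [he] using h
          · by_cases h4 : c = '@' ∧ d = 0
            · have h := pvScan_after_split cs pre [] d e
              simp [he, h4, pvApp] at h ⊢
              simp [h.1, h.2]
            · have h := ih (pre ++ [c]) d e
              simp [he, h1, h2, h3, h4] at h ⊢
              simpa [he] using h

-- selector used to state the _split_actual characterization without a dependent match
def pvSel (s buf : List Char) (o : Option (List Char)) : List Char × List Char :=
  match o with
  | some l => (s, l)
  | none => (buf, buf)

-- _split_actual of the current buffer, via the fused scan of that buffer
theorem pvSplitActual_scan (buf s : List Char) (o : Option (List Char)) (d : Int) (e : Bool)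
    (h : List.foldl pvScanStep ([], none, 0, false) buf = (s, o, d, e)) :
    pvSplitActual buf = pvSel s buf o := by
  have h2 := pvSplitActualAux_scan buf [] 0 false
  simp only [List.nil_append, List.length_nil] at h2
  rw [pvSplitActual, h2, h]
  cases o <;> rfl

-- pvScanStep extends the raw buffer by the scanned character
theorem pvScanStep_enc (s : List Char) (o : Option (List Char)) (d : Int) (e : Bool) (c : Char) :
    (pvScanStep (s, o, d, e) c).1 ++ pvEnc (pvScanStep (s, o, d, e) c).2.1 = (s ++ pvEnc o) ++ [c] := by
  simp only [pvScanStep]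
  split_ifs with h1 h2 h3 h4 h5
  · exact pvApp_enc s o c
  · exact pvApp_enc s o c
  · exact pvApp_enc s o c
  · exact pvApp_enc s o c
  · simp [h5.1, h5.2.2, pvEnc]
  · exact pvApp_enc s o c

-- A's level parts produced from a given mid-scan state onwards
def pvPartsFrom (d : Int) (e : Bool) (buf : List Char) (cs : List Char) : List (List Char) :=
  if (List.foldl pvStepA ([], d, e, buf) cs).2.2.2 ≠ [] then
    (List.foldl pvStepA ([], d, e, buf) cs).1 ++ [(List.foldl pvStepA ([], d, e, buf) cs).2.2.2]
  else (List.foldl pvStepA ([], d, e, buf) cs).1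

-- B's trailing finalization
def pvFinishB (st : List (List Char) × List (List Char) × Bool × List Char × Option (List Char) × Int × Bool) :
    List (List Char) × List (List Char) × Bool :=
  if st.2.2.2.1 ≠ [] ∨ st.2.2.2.2.1 ≠ none then
    pvFinalize st.1 st.2.1 st.2.2.1 st.2.2.2.1 st.2.2.2.2.1
  else (st.1, st.2.1, st.2.2.1)

-- processing one raw level through A's second loop = B's finalize
theorem pvStepPart_eq_finalize (K D : List (List Char)) (f : Bool) (s : List Char)
    (o : Option (List Char)) (d : Int) (e : Bool)
    (h : List.foldl pvScanStep ([], none, 0, false) (s ++ pvEnc o) = (s, o, d, e)) :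
    pvStepPart (K, D, f) (s ++ pvEnc o) = pvFinalize K D f s o := by
  have hsp := pvSplitActual_scan (s ++ pvEnc o) s o d e h
  cases o with
  | none =>
    simp only [pvEnc, List.append_nil, pvSel] at hsp ⊢
    simp [pvStepPart, pvFinalize, hsp]
  | some l =>
    simp only [pvEnc, pvSel] at hsp ⊢
    simp [pvStepPart, pvFinalize, hsp]

-- aligned single steps outside the level separator
theorem pvStepB_align (K D : List (List Char)) (f : Bool) (s : List Char) (o : Option (List Char))
    (d : Int) (e : Bool) (c : Char) (hns : ¬(e = false ∧ c = '!' ∧ d = 0)) :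
    pvStepB (K, D, f, s, o, d, e) c = (K, D, f, pvScanStep (s, o, d, e) c) := by
  cases e with
  | true => simp [pvStepB, pvScanStep]
  | false =>
    have hnot : ¬(c = '!' ∧ d = 0) := fun hc => hns ⟨rfl, hc.1, hc.2⟩
    simp only [pvStepB, pvScanStep, hnot, if_false, Bool.false_eq_true]
    split_ifs <;> rfl

theorem pvStepA_align (P : List (List Char)) (s : List Char) (o : Option (List Char))
    (d : Int) (e : Bool) (c : Char) (hns : ¬(e = false ∧ c = '!' ∧ d = 0)) :
    pvStepA (P, d, e, s ++ pvEnc o) c =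
      (P, (pvScanStep (s, o, d, e) c).2.2.1, (pvScanStep (s, o, d, e) c).2.2.2,
        (pvScanStep (s, o, d, e) c).1 ++ pvEnc (pvScanStep (s, o, d, e) c).2.1) := by
  cases e with
  | true => simp [pvStepA, pvScanStep, pvApp_enc]
  | false =>
    have hnot : ¬(c = '!' ∧ d = 0) := fun hc => hns ⟨rfl, hc.1, hc.2⟩
    simp only [pvStepA, pvScanStep, hnot, if_false, Bool.false_eq_true]
    split_ifs <;> cases o <;> simp_all [pvApp, pvEnc]

-- the main invariant: B's fused loop equals A's two phases from any aligned mid-scan state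
theorem pvMain (cs : List Char) (K D : List (List Char)) (f : Bool) (s : List Char)
    (o : Option (List Char)) (d : Int) (e : Bool)
    (h : List.foldl pvScanStep ([], none, 0, false) (s ++ pvEnc o) = (s, o, d, e)) :
    pvFinishB (List.foldl pvStepB (K, D, f, s, o, d, e) cs) =
      List.foldl pvStepPart (K, D, f) (pvPartsFrom d e (s ++ pvEnc o) cs) := by
  induction cs generalizing K D f s o d e with
  | nil =>
    by_cases hb : s ++ pvEnc o = []
    · have hs : s = [] := by cases o <;> simp [pvEnc] at hb <;> simp [hb]
      have ho : o = none := by cases o <;> simp [pvEnc, hs] at hb ⊢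
      subst hs; subst ho
      simp [pvFinishB, pvPartsFrom, pvEnc]
    · have hne : s ≠ [] ∨ o ≠ none := by
        by_contra hc
        simp only [not_or, not_not] at hc
        simp [hc.1, hc.2, pvEnc] at hb
      simp only [List.foldl_nil, pvFinishB, pvPartsFrom, if_pos hb, if_pos hne]
      simp only [List.nil_append, List.foldl_cons, List.foldl_nil]
      exact (pvStepPart_eq_finalize K D f s o d e h).symm
  | cons c cs ih =>
    by_cases hsep : e = false ∧ c = '!' ∧ d = 0
    · obtain ⟨he, hc, hd⟩ := hsep
      subst he; subst hc; subst hd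
      simp only [List.foldl_cons]
      have hB : pvStepB (K, D, f, s, o, 0, false) '!' =
          ((pvFinalize K D f s o).1, (pvFinalize K D f s o).2.1, (pvFinalize K D f s o).2.2,
            [], none, 0, false) := by
        simp only [pvStepB]
        rw [if_neg (by simp), if_neg (by decide), if_neg (by decide), if_neg (by decide),
          if_pos (by simp)]
      have hA : pvStepA ([], 0, false, s ++ pvEnc o) '!' = ([s ++ pvEnc o], 0, false, []) := by
        simp only [pvStepA]
        rw [if_neg (by simp), if_neg (by decide), if_neg (by decide), if_neg (by decide),
          if_pos (by simp)]
        rfl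
      rw [hB]
      have hparts : pvPartsFrom 0 false (s ++ pvEnc o) ('!' :: cs) =
          (s ++ pvEnc o) :: pvPartsFrom 0 false [] cs := by
        unfold pvPartsFrom
        simp only [List.foldl_cons, hA]
        rw [pvFoldA_absorb cs [s ++ pvEnc o] 0 false []]
        split_ifs with h1 h2 h3 <;> simp_all
      rw [hparts, List.foldl_cons, pvStepPart_eq_finalize K D f s o 0 false h]
      have h0 : List.foldl pvScanStep ([], none, 0, false) ([] ++ pvEnc none) =
          ([], none, 0, false) := by simp [pvEnc]
      exact ih (pvFinalize K D f s o).1 (pvFinalize K D f s o).2.1 (pvFinalize K D f s o).2.2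
        [] none 0 false h0
    · simp only [List.foldl_cons]
      rw [pvStepB_align K D f s o d e c hsep]
      have h' : List.foldl pvScanStep ([], none, 0, false)
          ((pvScanStep (s, o, d, e) c).1 ++ pvEnc (pvScanStep (s, o, d, e) c).2.1) =
          pvScanStep (s, o, d, e) c := by
        rw [pvScanStep_enc, List.foldl_append, h]
        rfl
      have hparts : pvPartsFrom d e (s ++ pvEnc o) (c :: cs) =
          pvPartsFrom (pvScanStep (s, o, d, e) c).2.2.1 (pvScanStep (s, o, d, e) c).2.2.2
            ((pvScanStep (s, o, d, e) c).1 ++ pvEnc (pvScanStep (s, o, d, e) c).2.1) cs := by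
        unfold pvPartsFrom
        simp only [List.foldl_cons, pvStepA_align [] s o d e c hsep]
      rw [hparts]
      exact ih K D f (pvScanStep (s, o, d, e) c).1 (pvScanStep (s, o, d, e) c).2.1
        (pvScanStep (s, o, d, e) c).2.2.1 (pvScanStep (s, o, d, e) c).2.2.2 h'

-- ===== VERDICT (by name: the statement is the Claim_ definition above) =====
theorem split_levels_py_spec : Claim_equal_split_levels_py := by
  intro term _
  unfold Spec_split_levels_py
  have h := pvMain term.toList [] [] false [] none 0 false (by simp [pvEnc])
  rw [show ([] : List Char) ++ pvEnc none = [] from rfl] at h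
  exact congrArg (fun r : List (List Char) × List (List Char) × Bool =>
    (r.1.map String.mk, if r.2.2 then some (r.2.1.map String.mk) else none)) h.symm
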